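-- pv_equiv track=rewrite | github.com/YosysHQ/apicula | gowin_unpack.py | parse_luts
-- ===== SOURCE A (Python) =====
-- def parse_luts(tiledata):
--     excl = set()
--     luts = {}
--     try:
--         data = tiledata['shortval'][5]
--     except KeyError:
--         return luts
--
--     for lut, bit, *fuses in data:
--         luts[lut] = luts.get(lut, 0xffff) & ~(1<<bit)
--
--     return luts
-- ===== SOURCE B (Python) =====
-- def _lut_init(bits):
--     v = 0xffff
--     for b in bits:
--         v &= ~(1 << b)
--     return v
--
-- def parse_luts(tiledata):
--     try:
--         data = tiledata['shortval'][5]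
--     except KeyError:
--         return {}
--     groups = {}
--     for lut, bit, *fuses in data:
--         groups.setdefault(lut, []).append(bit)
--     return {lut: _lut_init(bits) for lut, bits in groups.items()}
-- ===== Notes on version B (the rewrite author's own statement) =====
-- stated objective: alternative
-- what changed: Replaces A's single fused dict accumulation (AND-ing each cleared bit into the running init value) by a build-index-then-transform pair: one pass groups the bit numbers per LUT in first-appearance order, then a comprehension computes each LUT's init value from its bit list.
import Mathlib
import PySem

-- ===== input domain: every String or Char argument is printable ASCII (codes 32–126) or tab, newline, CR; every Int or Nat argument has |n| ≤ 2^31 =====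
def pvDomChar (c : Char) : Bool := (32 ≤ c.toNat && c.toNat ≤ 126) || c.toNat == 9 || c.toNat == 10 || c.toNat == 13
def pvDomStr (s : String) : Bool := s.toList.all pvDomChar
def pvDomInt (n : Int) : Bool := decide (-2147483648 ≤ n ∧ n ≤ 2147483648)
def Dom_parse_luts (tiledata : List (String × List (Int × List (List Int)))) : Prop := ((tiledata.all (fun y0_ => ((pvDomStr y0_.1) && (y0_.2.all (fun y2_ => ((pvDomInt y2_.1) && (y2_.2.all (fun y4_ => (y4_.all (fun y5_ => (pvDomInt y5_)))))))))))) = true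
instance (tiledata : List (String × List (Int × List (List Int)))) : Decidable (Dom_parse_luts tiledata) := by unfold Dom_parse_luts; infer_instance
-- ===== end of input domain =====

-- B replaces A's fused dict accumulation by a group-bits-per-LUT index pass plus a per-LUT
-- init computation (same values, first-appearance key order); alternative decomposition, same cost.

-- ===== PORT A =====
-- one loop step of A: luts[lut] = luts.get(lut, 0xffff) & ~(1<<bit)
def pvStepA (luts : PySem.Dict Int Int) (row : List Int) : PySem.Dict Int Int :=
  match row with
  | lut :: bit :: _ =>
      luts.insert lut (PySem.Int.band (luts.getD lut 0xffff) (Int.not ((1 : Int) <<< bit.toNat)))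
  | _ => luts  -- unreachable under Pre_parse_luts (Python raises ValueError on such a row)

def parse_luts (tiledata : List (String × List (Int × List (List Int)))) : List (Int × Int) :=
  match (PySem.Dict.mk tiledata).get? "shortval" with
  | none => []                                   -- KeyError caught: return {}
  | some inner =>
    match (PySem.Dict.mk inner).get? 5 with
    | none => []                                 -- KeyError caught: return {}
    | some data => (data.foldl pvStepA PySem.Dict.empty).items

-- ===== PORT B =====
def pvLutInit (bits : List Int) : Int :=
  bits.foldl (fun v b => PySem.Int.band v (Int.not ((1 : Int) <<< b.toNat))) 0xffff

-- one loop step of B: groups[lut] = groups.get(lut, []) + [bit]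
def pvStepB (groups : PySem.Dict Int (List Int)) (row : List Int) : PySem.Dict Int (List Int) :=
  match row with
  | lut :: bit :: _ => groups.modify lut [] (fun bs => bs ++ [bit])
  | _ => groups  -- unreachable under Pre_parse_luts

def parse_luts_alt (tiledata : List (String × List (Int × List (List Int)))) : List (Int × Int) :=
  match (PySem.Dict.mk tiledata).get? "shortval" with
  | none => []
  | some inner =>
    match (PySem.Dict.mk inner).get? 5 with
    | none => []
    | some data =>
      ((data.foldl pvStepB PySem.Dict.empty).items).map (fun p => (p.1, pvLutInit p.2))

-- ===== PRECONDITION & SPEC =====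
-- a data row is unpackable (≥ 2 elements) and its bit is nonnegative (1 << negative raises)
def pvRowOK (row : List Int) : Bool :=
  match row with
  | _ :: bit :: _ => decide (0 ≤ bit)
  | _ => false

-- Pre_ excludes exactly the inputs where Python A raises: a row of data with fewer than two
-- elements (ValueError on unpacking) or a negative bit (ValueError on 1 << bit).
def Pre_parse_luts (tiledata : List (String × List (Int × List (List Int)))) : Prop :=
  (match (PySem.Dict.mk tiledata).get? "shortval" with
   | none => true
   | some inner =>
     match (PySem.Dict.mk inner).get? 5 with
     | none => true
     | some data => data.all pvRowOK) = true
instance (tiledata : List (String × List (Int × List (List Int)))) : Decidable (Pre_parse_luts tiledata) := by unfold Pre_parse_luts; infer_instance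

def pvWitness_parse_luts : (List (String × List (Int × List (List Int)))) :=
  [("shortval", [(5, [[1, 2], [1, 3], [2, 0], [3, 17, 9]])])]

def Spec_parse_luts (tiledata : List (String × List (Int × List (List Int)))) (out : List (Int × Int)) : Prop := out = parse_luts_alt tiledata
instance (tiledata : List (String × List (Int × List (List Int)))) (out : List (Int × Int)) : Decidable (Spec_parse_luts tiledata out) := by unfold Spec_parse_luts; infer_instance

-- ===== CLAIM (what is proved, stated in full; the proofs are below) =====
def Claim_equal_parse_luts : Prop := ∀ (tiledata : List (String × List (Int × List (List Int)))), Dom_parse_luts tiledata → Pre_parse_luts tiledata → Spec_parse_luts tiledata (parse_luts tiledata)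

-- ===== LEMMAS AND PROOFS =====

-- B's grouping dict with every bit list replaced by its computed init value
def pvDmap (d : PySem.Dict Int (List Int)) : PySem.Dict Int Int :=
  PySem.Dict.mk (d.items.map (fun p => (p.1, pvLutInit p.2)))

theorem pvDmap_get? (d : PySem.Dict Int (List Int)) (k : Int) :
    (pvDmap d).get? k = (d.get? k).map pvLutInit := by
  simp only [pvDmap, PySem.Dict.get?, List.find?_map]
  cases h : List.find? ((fun p => p.1 == k) ∘ fun p => (p.1, pvLutInit p.2)) d.items with
  | none =>
    have : List.find? (fun p => p.1 == k) d.items = none := by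
      rw [← h]; rfl
    simp [this]
  | some p =>
    have : List.find? (fun p => p.1 == k) d.items = some p := by
      rw [← h]; rfl
    simp [this]

theorem pvDmap_contains (d : PySem.Dict Int (List Int)) (k : Int) :
    (pvDmap d).contains k = d.contains k := by
  rw [PySem.Dict.contains_eq_isSome_get?, PySem.Dict.contains_eq_isSome_get?, pvDmap_get?]
  cases d.get? k <;> rfl

theorem pvDmap_getD (d : PySem.Dict Int (List Int)) (k : Int) :
    (pvDmap d).getD k 0xffff = pvLutInit (d.getD k []) := by
  simp only [PySem.Dict.getD, pvDmap_get?]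
  cases d.get? k with
  | none => rfl
  | some v => rfl

theorem pvDmap_insert (d : PySem.Dict Int (List Int)) (k : Int) (v : List Int) :
    pvDmap (d.insert k v) = (pvDmap d).insert k (pvLutInit v) := by
  unfold PySem.Dict.insert
  rw [pvDmap_contains]
  cases hc : d.contains k with
  | true =>
    simp only [if_true, pvDmap, List.map_map]
    congr 1
    apply List.map_congr_left
    intro p _
    by_cases hp : (p.1 == k) = true
    · simp [Function.comp, hp]
    · simp [Function.comp, hp]
  | false =>
    simp [pvDmap]

theorem pvLutInit_append (bs : List Int) (b : Int) :
    pvLutInit (bs ++ [b]) =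
      PySem.Int.band (pvLutInit bs) (Int.not ((1 : Int) <<< b.toNat)) := by
  simp only [pvLutInit, List.foldl_append, List.foldl_cons, List.foldl_nil,
    Int.shiftLeft_natCast_right]

theorem pvStep_comm (g : PySem.Dict Int (List Int)) (row : List Int) :
    pvStepA (pvDmap g) row = pvDmap (pvStepB g row) := by
  match row with
  | [] => rfl
  | [_] => rfl
  | lut :: bit :: rest =>
    simp only [pvStepA, pvStepB, PySem.Dict.modify, pvDmap_insert, pvLutInit_append,
      pvDmap_getD]

theorem pvFold_comm (data : List (List Int)) (g : PySem.Dict Int (List Int)) :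
    data.foldl pvStepA (pvDmap g) = pvDmap (data.foldl pvStepB g) := by
  induction data generalizing g with
  | nil => rfl
  | cons row rows ih =>
    simp only [List.foldl_cons, pvStep_comm, ih]

-- ===== VERDICT (by name: the statement is the Claim_ definition above) =====
theorem parse_luts_spec : Claim_equal_parse_luts := by
  intro tiledata _ _
  unfold Spec_parse_luts
  cases h1 : (PySem.Dict.mk tiledata).get? "shortval" with
  | none => simp [parse_luts, parse_luts_alt, h1]
  | some inner =>
    cases h2 : (PySem.Dict.mk inner).get? 5 with
    | none => simp [parse_luts, parse_luts_alt, h1, h2]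
    | some data =>
      simp only [parse_luts, parse_luts_alt, h1, h2]
      have hempty : (PySem.Dict.empty : PySem.Dict Int Int) = pvDmap PySem.Dict.empty := rfl
      rw [hempty, pvFold_comm]
      rfl
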